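-- pv_equiv track=rewrite | github.com/martinez1120/drex | python/drex/eval/babilong.py | _embed_in_context
-- ===== SOURCE A (Python) =====
-- _DISTRACTOR = "The quick brown fox jumps over the lazy dog. "
--
-- _PREFIX = "Pay attention to the following story. "
--
-- _QUESTION_PREFIX = " Question: "
--
-- def _embed_in_context(
--
--     context_len: int,
--     facts: str,
--     question: str,
--     answer: str,
-- ) -> tuple[list[int], str]:
--     """
--     Embed `facts` at ~50% depth in a distractor context of ~context_len chars.
--     Returns (token_ids: list[int], answer: str).
--     """
--     prefix_toks = [ord(c) for c in _PREFIX]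
--     fact_toks = [ord(c) for c in facts]
--     q_toks = [ord(c) for c in (_QUESTION_PREFIX + question)]
--
--     fact_pos = (context_len // 2) - len(fact_toks)
--     if fact_pos < len(prefix_toks):
--         fact_pos = len(prefix_toks)
--
--     dist_before = fact_pos - len(prefix_toks)
--     dist_after = max(
--         0,
--         context_len
--         - len(prefix_toks)
--         - len(fact_toks)
--         - dist_before
--         - len(q_toks)
--         - len(answer),
--     )
--
--     def _distractors(n: int) -> list[int]:
--         out: list[int] = []
--         while len(out) < n:
--             out.extend(ord(c) for c in _DISTRACTOR)
--         return out[:n]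
--
--     tokens = (
--         prefix_toks
--         + _distractors(dist_before)
--         + fact_toks
--         + _distractors(dist_after)
--         + q_toks
--     )
--     return [min(t, 127) for t in tokens], answer
-- ===== SOURCE B (Python) =====
-- _DISTRACTOR = "The quick brown fox jumps over the lazy dog. "
--
-- _PREFIX = "Pay attention to the following story. "
--
-- _QUESTION_PREFIX = " Question: "
--
--
-- def _embed_in_context(
--     context_len: int,
--     facts: str,
--     question: str,
--     answer: str,
-- ) -> tuple[list[int], str]:
--     """Position-indexed generation: never concatenates or builds filler spans;
--     each token is computed directly from its index by segment boundaries and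
--     modular indexing into _DISTRACTOR."""
--     p = len(_PREFIX)
--     f = len(facts)
--     q_str = _QUESTION_PREFIX + question
--     q = len(q_str)
--     fact_pos = max(context_len // 2 - f, p)
--     before = fact_pos - p
--     after = max(0, context_len - p - f - before - q - len(answer))
--     b1 = p + before
--     b2 = b1 + f
--     b3 = b2 + after
--
--     def tok(i: int) -> int:
--         if i < p:
--             c = _PREFIX[i]
--         elif i < b1:
--             c = _DISTRACTOR[(i - p) % len(_DISTRACTOR)]
--         elif i < b2:
--             c = facts[i - b1]
--         elif i < b3:
--             c = _DISTRACTOR[(i - b2) % len(_DISTRACTOR)]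
--         else:
--             c = q_str[i - b3]
--         return min(ord(c), 127)
--
--     return [tok(i) for i in range(b3 + q)], answer
-- ===== Notes on version B (the rewrite author's own statement) =====
-- stated objective: alternative
-- what changed: B never builds or concatenates the context: it computes segment boundaries once and generates each token directly from its position in a single pass over range(total), reading distractor characters by modular indexing into _DISTRACTOR, instead of A's assembly of five token lists (with a grow-until-long-enough filler loop) followed by concatenation and a second clamping pass.
import Mathlib
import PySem

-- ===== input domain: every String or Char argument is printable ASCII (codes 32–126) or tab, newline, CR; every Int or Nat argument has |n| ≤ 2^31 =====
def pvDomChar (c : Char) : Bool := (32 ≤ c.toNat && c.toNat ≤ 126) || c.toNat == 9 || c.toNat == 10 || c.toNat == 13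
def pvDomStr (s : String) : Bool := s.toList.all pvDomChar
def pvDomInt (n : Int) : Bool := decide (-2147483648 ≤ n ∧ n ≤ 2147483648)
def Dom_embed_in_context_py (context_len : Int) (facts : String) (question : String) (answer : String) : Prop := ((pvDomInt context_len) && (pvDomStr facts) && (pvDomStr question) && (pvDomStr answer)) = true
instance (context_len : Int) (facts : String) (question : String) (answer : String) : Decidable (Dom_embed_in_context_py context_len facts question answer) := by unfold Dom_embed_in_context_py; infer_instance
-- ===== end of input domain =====

-- B generates each token directly from its position (segment boundaries + modular index
-- into the distractor text) in one pass over range(total): no list/string concatenation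
-- and no filler-span construction; same values.

-- module constants (shared text of both Pythons)
def pvDistractor : List Char := "The quick brown fox jumps over the lazy dog. ".toList
def pvPrefix : List Char := "Pay attention to the following story. ".toList
def pvQPrefix : List Char := " Question: ".toList

-- ===== PORT A =====
-- ord(c) of a Lean Char is c.toNat (code point), exact for all Python 1-char strings
def pvOrd (c : Char) : Int := (c.toNat : Int)

def pvDistToks : List Int := pvDistractor.map pvOrd

-- the `while len(out) < n: out.extend(ord(c) for c in _DISTRACTOR)` loop of A's _distractors
def pvDistLoop (out : List Int) (n : Int) : List Int :=
  if (out.length : Int) < n then pvDistLoop (out ++ pvDistToks) n else out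
termination_by (n - out.length).toNat
decreasing_by
  rename_i h
  simp only [List.length_append]
  have : pvDistToks.length = 45 := by decide
  omega

def pvDistractors (n : Int) : List Int :=
  PySem.List.slice (pvDistLoop [] n) none (some n)    -- out[:n]

-- literal transliteration of A (strings handled on the List Char side; '+' of Python
-- strings is list append, exact by String.toList_append)
def embed_in_context_py (context_len : Int) (facts : String) (question : String) (answer : String) : List Int × String :=
  let prefix_toks := pvPrefix.map pvOrd
  let fact_toks := facts.toList.map pvOrd
  let q_toks := (pvQPrefix ++ question.toList).map pvOrd
  let fact_pos := PySem.Int.floordiv context_len 2 - (fact_toks.length : Int)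
  let fact_pos := if fact_pos < (prefix_toks.length : Int) then (prefix_toks.length : Int) else fact_pos
  let dist_before := fact_pos - (prefix_toks.length : Int)
  let dist_after := max 0 (context_len - (prefix_toks.length : Int) - (fact_toks.length : Int)
      - dist_before - (q_toks.length : Int) - (answer.toList.length : Int))
  let tokens := prefix_toks ++ pvDistractors dist_before ++ fact_toks ++ pvDistractors dist_after ++ q_toks
  (tokens.map (fun t => min t 127), answer)

-- ===== PORT B =====
-- literal transliteration of B (Source B): position-indexed generation. before/after are
-- nonnegative Python ints, kept as Nat via .toNat (exact: the subtraction/max are ≥ 0);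
-- every index is in range by the guards, so Python's l[i] is List.getD (default unused);
-- Python's `%` on nonnegative ints is Nat `%`.
def embed_in_context_py_alt (context_len : Int) (facts : String) (question : String) (answer : String) : List Int × String :=
  let p := pvPrefix.length
  let f := facts.toList.length
  let q_str := pvQPrefix ++ question.toList
  let q := q_str.length
  let fact_pos := max (PySem.Int.floordiv context_len 2 - (f : Int)) (p : Int)
  let before := (fact_pos - (p : Int)).toNat
  let after := (max 0 (context_len - (p : Int) - (f : Int) - (before : Int) - (q : Int)
      - (answer.toList.length : Int))).toNat
  let b1 := p + before
  let b2 := b1 + f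
  let b3 := b2 + after
  let tok := fun (i : Nat) =>
    if i < p then min (pvOrd (pvPrefix.getD i ' ')) 127
    else if i < b1 then min (pvOrd (pvDistractor.getD ((i - p) % pvDistractor.length) ' ')) 127
    else if i < b2 then min (pvOrd (facts.toList.getD (i - b1) ' ')) 127
    else if i < b3 then min (pvOrd (pvDistractor.getD ((i - b2) % pvDistractor.length) ' ')) 127
    else min (pvOrd (q_str.getD (i - b3) ' ')) 127
  ((List.range (b3 + q)).map tok, answer)

-- ===== PRECONDITION & SPEC =====
def Spec_embed_in_context_py (context_len : Int) (facts : String) (question : String) (answer : String) (out : List Int × String) : Prop := out = embed_in_context_py_alt context_len facts question answer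
instance (context_len : Int) (facts : String) (question : String) (answer : String) (out : List Int × String) : Decidable (Spec_embed_in_context_py context_len facts question answer out) := by unfold Spec_embed_in_context_py; infer_instance

-- ===== CLAIM (what is proved, stated in full; the proofs are below) =====
def Claim_equal_embed_in_context_py : Prop := ∀ (context_len : Int) (facts : String) (question : String) (answer : String), Dom_embed_in_context_py context_len facts question answer → Spec_embed_in_context_py context_len facts question answer (embed_in_context_py context_len facts question answer)

-- ===== LEMMAS AND PROOFS =====

-- reading a list by index over range n is its take n, mapped
theorem pv_map_range_getD (l : List Char) (n : Nat) (f : Char → Int) (h : n ≤ l.length) :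
    (List.range n).map (fun i => f (l.getD i ' ')) = (l.take n).map f := by
  apply List.ext_getElem
  · simp [h]
  · intro i h1 h2
    simp only [List.getElem_map, List.getElem_range, List.getElem_take]
    rw [List.getD_eq_getElem]

-- a prefix of cyclic repetitions of the distractor is read by modular indexing
theorem pv_dist_range (g : Char → Int) (k : Nat) : ∀ (n : Nat), n ≤ 45 * k →
    ((List.replicate k pvDistractor).flatten.take n).map g
      = (List.range n).map (fun i => g (pvDistractor.getD (i % 45) ' ')) := by
  induction k with
  | zero =>
    intro n hn
    interval_cases n
    simp
  | succ k ih =>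
    intro n hn
    have hlen : pvDistractor.length = 45 := by decide
    rw [List.replicate_succ, List.flatten_cons]
    have hmodself : ∀ m : Nat, m ≤ 45 →
        (List.range m).map (fun i => g (pvDistractor.getD (i % 45) ' '))
          = (List.range m).map (fun i => g (pvDistractor.getD i ' ')) := by
      intro m hm
      apply List.map_congr_left
      intro i hi
      have : i < 45 := by have := List.mem_range.mp hi; omega
      rw [Nat.mod_eq_of_lt this]
    by_cases hc : n ≤ 45
    · rw [List.take_append_of_le_length (show n ≤ pvDistractor.length by omega),
          hmodself n hc, pv_map_range_getD _ _ _ (by omega)]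
    · have hsplit : n = 45 + (n - 45) := by omega
      rw [List.take_append, List.take_of_length_le (by omega), List.map_append, hlen]
      conv_rhs => rw [hsplit, List.range_add, List.map_append, List.map_map]
      have h1 : (List.range 45).map (fun i => g (pvDistractor.getD (i % 45) ' '))
          = pvDistractor.map g := by
        rw [hmodself 45 le_rfl, pv_map_range_getD _ _ _ (by omega),
            List.take_of_length_le (le_of_eq hlen)]
      have h2 : (List.range (n - 45)).map
            ((fun i => g (pvDistractor.getD (i % 45) ' ')) ∘ fun x => 45 + x)
          = ((List.replicate k pvDistractor).flatten.take (n - 45)).map g := by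
        rw [ih (n - 45) (by omega)]
        apply List.map_congr_left
        intro i _
        simp only [Function.comp]
        rw [Nat.add_mod_left]
      rw [h1, h2]

-- A's while-loop appends whole copies of _DISTRACTOR until the length reaches n:
-- it produces exactly ⌈(n - |out|)/45⌉ copies (0 when already long enough).
theorem pvDistLoop_eq : ∀ (k : Nat) (n : Int) (out : List Int), (n - out.length).toNat ≤ k →
    pvDistLoop out n
      = out ++ (List.replicate (PySem.Int.floordiv (n - out.length + 44) 45).toNat pvDistToks).flatten := by
  intro k
  induction k with
  | zero =>
    intro n out hk
    rw [pvDistLoop]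
    have hle : n ≤ (out.length : Int) := by omega
    have h1 : PySem.Int.floordiv (n - out.length + 44) 45 < 1 := by
      rw [PySem.Int.floordiv_lt_iff_lt_mul (by omega)]; omega
    have ht : (PySem.Int.floordiv (n - out.length + 44) 45).toNat = 0 := by omega
    rw [if_neg (not_lt.mpr hle), ht]
    simp
  | succ k ih =>
    intro n out hk
    rw [pvDistLoop]
    by_cases h : (out.length : Int) < n
    · simp only [if_pos h]
      have hlen : pvDistToks.length = 45 := by decide
      rw [ih n (out ++ pvDistToks) (by simp [hlen]; omega)]
      simp only [List.length_append, hlen]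
      push_cast
      have harith : (n - ((out.length : Int) + 45) + 44) = n - (out.length : Int) - 1 := by omega
      rw [harith]
      have hc : PySem.Int.floordiv (n - (out.length : Int) + 44) 45
          = PySem.Int.floordiv (n - (out.length : Int) - 1) 45 + 1 := by
        have hb := (PySem.Int.floordiv_eq_iff_of_pos (a := n - (out.length : Int) - 1)
          (q := PySem.Int.floordiv (n - (out.length : Int) - 1) 45) (show (0:Int) < 45 by omega)).mp rfl
        rw [PySem.Int.floordiv_eq_iff_of_pos (by omega)]
        constructor <;> omega
      rw [hc]
      have ht : (PySem.Int.floordiv (n - (out.length : Int) - 1) 45 + 1).toNat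
          = (PySem.Int.floordiv (n - (out.length : Int) - 1) 45).toNat + 1 := by
        have hb := (PySem.Int.floordiv_eq_iff_of_pos (a := n - (out.length : Int) - 1)
          (q := PySem.Int.floordiv (n - (out.length : Int) - 1) 45) (show (0:Int) < 45 by omega)).mp rfl
        omega
      rw [ht, List.replicate_succ]
      simp
    · have hle : n ≤ (out.length : Int) := by omega
      have h1 : PySem.Int.floordiv (n - out.length + 44) 45 < 1 := by
        rw [PySem.Int.floordiv_lt_iff_lt_mul (by omega)]; omega
      have ht : (PySem.Int.floordiv (n - out.length + 44) 45).toNat = 0 := by omega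
      rw [if_neg (not_lt.mpr hle), ht]
      simp

-- A's _distractors(n), clamped, read off by B's modular indexing
theorem pv_seg_dist (n : Int) (hn : 0 ≤ n) :
    (pvDistractors n).map (fun t => min t 127)
      = (List.range n.toNat).map (fun i => min (pvOrd (pvDistractor.getD (i % 45) ' ')) 127) := by
  unfold pvDistractors
  rw [pvDistLoop_eq n.toNat n [] (by simp), PySem.List.slice_to _ hn]
  simp only [List.nil_append, List.length_nil, Nat.cast_zero, Int.sub_zero]
  have hK : 0 ≤ PySem.Int.floordiv (n + 44) 45 := by
    rw [PySem.Int.le_floordiv_iff_mul_le (by omega)]; omega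
  have hb := (PySem.Int.floordiv_eq_iff_of_pos (a := n + 44)
    (q := PySem.Int.floordiv (n + 44) 45) (show (0:Int) < 45 by omega)).mp rfl
  have hbound : n.toNat ≤ 45 * (PySem.Int.floordiv (n + 44) 45).toNat := by omega
  show (List.take n.toNat
      ((List.replicate (PySem.Int.floordiv (n + 44) 45).toNat (pvDistractor.map pvOrd)).flatten)).map _ = _
  rw [← List.map_replicate, ← List.map_flatten, ← List.map_take, List.map_map]
  exact pv_dist_range _ _ _ hbound

-- a tokenized character list, clamped, read off by direct indexing
theorem pv_seg_list (l : List Char) :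
    l.map ((fun t => min t 127) ∘ pvOrd)
      = (List.range l.length).map (fun i => min (pvOrd (l.getD i ' ')) 127) := by
  apply List.ext_getElem
  · simp
  · intro i h1 h2
    simp only [List.getElem_map, List.getElem_range, Function.comp]
    rw [List.getD_eq_getElem]

-- the assembled token list of A equals B's position-indexed generation
theorem pv_main (db da : Int) (hdb : 0 ≤ db) (hda : 0 ≤ da) (F Q : List Char) :
    (pvPrefix.map pvOrd ++ pvDistractors db ++ F.map pvOrd ++ pvDistractors da ++ Q.map pvOrd).map
        (fun t => min t 127)
      = (List.range (38 + db.toNat + F.length + da.toNat + Q.length)).map (fun i =>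
          if i < 38 then min (pvOrd (pvPrefix.getD i ' ')) 127
          else if i < 38 + db.toNat then min (pvOrd (pvDistractor.getD ((i - 38) % 45) ' ')) 127
          else if i < 38 + db.toNat + F.length then min (pvOrd (F.getD (i - (38 + db.toNat)) ' ')) 127
          else if i < 38 + db.toNat + F.length + da.toNat then
            min (pvOrd (pvDistractor.getD ((i - (38 + db.toNat + F.length)) % 45) ' ')) 127
          else min (pvOrd (Q.getD (i - (38 + db.toNat + F.length + da.toNat)) ' ')) 127) := by
  have hp : pvPrefix.length = 38 := by decide
  simp only [List.map_append, List.map_map]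
  rw [pv_seg_list pvPrefix, hp, pv_seg_dist db hdb, pv_seg_list F, pv_seg_dist da hda, pv_seg_list Q,
      List.range_add, List.range_add, List.range_add, List.range_add]
  simp only [List.map_append, List.map_map]
  set T : Nat → Int := fun i =>
      if i < 38 then min (pvOrd (pvPrefix.getD i ' ')) 127
      else if i < 38 + db.toNat then min (pvOrd (pvDistractor.getD ((i - 38) % 45) ' ')) 127
      else if i < 38 + db.toNat + F.length then min (pvOrd (F.getD (i - (38 + db.toNat)) ' ')) 127
      else if i < 38 + db.toNat + F.length + da.toNat then
        min (pvOrd (pvDistractor.getD ((i - (38 + db.toNat + F.length)) % 45) ' ')) 127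
      else min (pvOrd (Q.getD (i - (38 + db.toNat + F.length + da.toNat)) ' ')) 127
    with hT
  have e1 : (List.range 38).map T
      = (List.range 38).map (fun i => min (pvOrd (pvPrefix.getD i ' ')) 127) := by
    apply List.map_congr_left
    intro i hi
    have hi' : i < 38 := List.mem_range.mp hi
    simp only [hT]
    rw [if_pos (by omega)]
  have e2 : (List.range db.toNat).map (T ∘ fun x => 38 + x)
      = (List.range db.toNat).map (fun i => min (pvOrd (pvDistractor.getD (i % 45) ' ')) 127) := by
    apply List.map_congr_left
    intro i hi
    have hi' : i < db.toNat := List.mem_range.mp hi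
    simp only [Function.comp, hT]
    rw [if_neg (by omega), if_pos (by omega)]
    have he : 38 + i - 38 = i := by omega
    rw [he]
  have e3 : (List.range F.length).map (T ∘ fun x => 38 + db.toNat + x)
      = (List.range F.length).map (fun i => min (pvOrd (F.getD i ' ')) 127) := by
    apply List.map_congr_left
    intro i hi
    have hi' : i < F.length := List.mem_range.mp hi
    simp only [Function.comp, hT]
    rw [if_neg (by omega), if_neg (by omega), if_pos (by omega)]
    have he : 38 + db.toNat + i - (38 + db.toNat) = i := by omega
    rw [he]
  have e4 : (List.range da.toNat).map (T ∘ fun x => 38 + db.toNat + F.length + x)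
      = (List.range da.toNat).map (fun i => min (pvOrd (pvDistractor.getD (i % 45) ' ')) 127) := by
    apply List.map_congr_left
    intro i hi
    have hi' : i < da.toNat := List.mem_range.mp hi
    simp only [Function.comp, hT]
    rw [if_neg (by omega), if_neg (by omega), if_neg (by omega), if_pos (by omega)]
    have he : 38 + db.toNat + F.length + i - (38 + db.toNat + F.length) = i := by omega
    rw [he]
  have e5 : (List.range Q.length).map (T ∘ fun x => 38 + db.toNat + F.length + da.toNat + x)
      = (List.range Q.length).map (fun i => min (pvOrd (Q.getD i ' ')) 127) := by
    apply List.map_congr_left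
    intro i hi
    have hi' : i < Q.length := List.mem_range.mp hi
    simp only [Function.comp, hT]
    rw [if_neg (by omega), if_neg (by omega), if_neg (by omega), if_neg (by omega)]
    have he : 38 + db.toNat + F.length + da.toNat + i - (38 + db.toNat + F.length + da.toNat) = i := by
      omega
    rw [he]
  rw [e1, e2, e3, e4, e5]

-- ===== VERDICT (by name: the statement is the Claim_ definition above) =====
theorem embed_in_context_py_spec : Claim_equal_embed_in_context_py := by
  intro context_len facts question answer _
  unfold Spec_embed_in_context_py embed_in_context_py embed_in_context_py_alt
  have hp : pvPrefix.length = 38 := by decide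
  have hd : pvDistractor.length = 45 := by decide
  simp only [List.length_map, hp, hd, Nat.cast_ofNat, Prod.mk.injEq]
  refine ⟨?_, trivial⟩
  set fp := PySem.Int.floordiv context_len 2 - (facts.toList.length : Int) with hfp
  have hmax : max fp (38 : Int) = if fp < (38 : Int) then (38 : Int) else fp := by
    split_ifs <;> omega
  rw [hmax]
  set P : Int := if fp < (38 : Int) then (38 : Int) else fp with hP
  have hdb : 0 ≤ P - 38 := by rw [hP]; split_ifs <;> omega
  have hcast : ((P - 38).toNat : Int) = P - 38 := Int.toNat_of_nonneg hdb
  rw [hcast]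
  exact pv_main (P - 38) _ hdb (le_max_left 0 _) facts.toList (pvQPrefix ++ question.toList)
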